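-- pv_equiv track=rewrite | github.com/duckshell/scanner | osfingerscan.py | getXI
-- ===== SOURCE A (Python) =====
-- def getXI(ipids):
--     zero = True
--     for i in range(len(ipids)):
--         ipid = ipids[i]
--         if ipid != 0:
--             zero = False
--             break
--     if zero:
--         return 'Z'
--
--     diffs = []
--     for i in range(len(ipids) - 1):
--         if ipids[i + 1] > ipids[i]:
--             diffs.append(ipids[i + 1] - ipids[i])
--         else:
--             diffs.append(ipids[i + 1] - ipids[i] + 0xFFFF + 1)
--
--     if len(diffs) > 1:
--         eq2w = True
--         for i in range(len(diffs)):
--             diff = diffs[i]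
--             if diff < 20000:
--                 eq2w = False
--                 break
--         if eq2w:
--             return 'RD'
--
--     alleq = True
--     for i in range(len(diffs)):
--         diff = diffs[i]
--         if diff != 0:
--             alleq = False
--             break
--     if alleq:
--         return hex(ipids[0])[2:].upper()
--
--     for i in range(len(diffs)):
--         if diffs[i] > 1000 and diffs[i] % 256 != 0 or diffs[i] % 256 == 0 and diffs[i] >= 25600:
--             return 'RI'
--
--     BI = True
--     for i in range(len(diffs)):
--         diff = diffs[i]
--         if diff % 256 != 0 or diff > 5120:
--             BI = False
--             break
--     if BI:
--         return 'BI'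
--
--     I = True
--     for i in range(len(diffs)):
--         diff = diffs[i]
--         if diff > 9:
--             I = False
--             break
--     if I:
--         return 'I'
--
--     return None
-- ===== SOURCE B (Python) =====
-- def getXI(ipids):
--     if all(x == 0 for x in ipids):
--         return 'Z'
--     diffs = [b - a if b > a else b - a + 0x10000 for a, b in zip(ipids, ipids[1:])]
--     all_ge = all_zero = all_bi = all_i = True
--     any_ri = False
--     for d in diffs:
--         if d < 20000:
--             all_ge = False
--         if d != 0:
--             all_zero = False
--         if d > 1000 and d % 256 != 0 or d % 256 == 0 and d >= 25600:
--             any_ri = True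
--         if d % 256 != 0 or d > 5120:
--             all_bi = False
--         if d > 9:
--             all_i = False
--     if len(diffs) > 1 and all_ge:
--         return 'RD'
--     if all_zero:
--         return hex(ipids[0])[2:].upper()
--     if any_ri:
--         return 'RI'
--     if all_bi:
--         return 'BI'
--     if all_i:
--         return 'I'
--     return None
-- ===== Notes on version B (the rewrite author's own statement) =====
-- stated objective: alternative
-- what changed: Replaces A's five separate early-exit scans over diffs (plus an index-based diff builder) with one zip-comprehension for diffs and a single pass that accumulates all five classification flags, evaluated afterwards in A's order.
import Mathlib
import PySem

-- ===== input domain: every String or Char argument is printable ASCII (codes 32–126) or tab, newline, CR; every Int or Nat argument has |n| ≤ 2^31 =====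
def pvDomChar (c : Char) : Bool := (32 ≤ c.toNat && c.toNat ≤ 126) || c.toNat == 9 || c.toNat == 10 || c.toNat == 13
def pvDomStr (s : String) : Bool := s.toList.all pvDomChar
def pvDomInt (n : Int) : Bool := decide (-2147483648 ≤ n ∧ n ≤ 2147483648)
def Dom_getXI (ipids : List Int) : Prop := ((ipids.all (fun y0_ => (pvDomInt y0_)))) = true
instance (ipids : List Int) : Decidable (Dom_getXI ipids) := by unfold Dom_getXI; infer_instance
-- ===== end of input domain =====

-- B restructures A: one zipWith builds diffs, one fold accumulates all five flags; same O(n) cost ("alternative").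
-- Shared helper for the builtin composite hex(n)[2:].upper() (exact for every Int: '0x…' loses its prefix,
-- '-0x…' keeps an 'X' from the slice; fuel = n is always enough digits).
def hexDigit (n : Nat) : Char := if n < 10 then Char.ofNat (48 + n) else Char.ofNat (55 + n)

def hexCharsFuel : Nat → Nat → List Char
  | 0, _ => []
  | _ + 1, 0 => []
  | f + 1, n + 1 => hexCharsFuel f ((n + 1) / 16) ++ [hexDigit ((n + 1) % 16)]

def hexSlice (n : Int) : String :=
  if n = 0 then "0"
  else if n > 0 then String.ofList (hexCharsFuel n.toNat n.toNat)
  else String.ofList ('X' :: hexCharsFuel (-n).toNat (-n).toNat)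

-- ===== PORT A =====
-- each early-exit loop of A becomes its own structural recursion
def aZero : List Int → Bool
  | [] => true
  | x :: rest => if x ≠ 0 then false else aZero rest

def diffsA : List Int → List Int
  | a :: b :: rest => (if b > a then b - a else b - a + 0xFFFF + 1) :: diffsA (b :: rest)
  | _ => []

def aEq2w : List Int → Bool
  | [] => true
  | d :: rest => if d < 20000 then false else aEq2w rest

def aAllEq : List Int → Bool
  | [] => true
  | d :: rest => if d ≠ 0 then false else aAllEq rest

def aRI : List Int → Bool
  | [] => false
  | d :: rest =>
    if (decide (d > 1000) && !(PySem.Int.mod d 256 == 0)) ||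
       ((PySem.Int.mod d 256 == 0) && decide (d ≥ 25600)) then true else aRI rest

def aBI : List Int → Bool
  | [] => true
  | d :: rest => if (!(PySem.Int.mod d 256 == 0)) || decide (d > 5120) then false else aBI rest

def aI : List Int → Bool
  | [] => true
  | d :: rest => if d > 9 then false else aI rest

-- ipids[0] is only read when ipids ≠ [] (the all-zero check returned 'Z' for []); headD 0 is a total rendering
def getXI (ipids : List Int) : Option String :=
  if aZero ipids then some "Z"
  else
    let diffs := diffsA ipids
    if decide (diffs.length > 1) && aEq2w diffs then some "RD"
    else if aAllEq diffs then some (hexSlice (ipids.headD 0))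
    else if aRI diffs then some "RI"
    else if aBI diffs then some "BI"
    else if aI diffs then some "I"
    else none

-- ===== PORT B =====
def bStep (s : Bool × Bool × Bool × Bool × Bool) (d : Int) : Bool × Bool × Bool × Bool × Bool :=
  (s.1 && !decide (d < 20000),
   s.2.1 && (d == 0),
   s.2.2.1 || ((decide (d > 1000) && !(PySem.Int.mod d 256 == 0)) ||
               ((PySem.Int.mod d 256 == 0) && decide (d ≥ 25600))),
   s.2.2.2.1 && !((!(PySem.Int.mod d 256 == 0)) || decide (d > 5120)),
   s.2.2.2.2 && !decide (d > 9))

def getXI_alt (ipids : List Int) : Option String :=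
  if ipids.all (fun x => x == 0) then some "Z"
  else
    let diffs := List.zipWith (fun a b => if b > a then b - a else b - a + 0x10000) ipids ipids.tail
    let s := diffs.foldl bStep (true, true, false, true, true)
    if decide (diffs.length > 1) && s.1 then some "RD"
    else if s.2.1 then some (hexSlice (ipids.headD 0))
    else if s.2.2.1 then some "RI"
    else if s.2.2.2.1 then some "BI"
    else if s.2.2.2.2 then some "I"
    else none

-- ===== PRECONDITION & SPEC =====
def Spec_getXI (ipids : List Int) (out : Option String) : Prop := out = getXI_alt ipids
instance (ipids : List Int) (out : Option String) : Decidable (Spec_getXI ipids out) := by unfold Spec_getXI; infer_instance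

-- ===== CLAIM (what is proved, stated in full; the proofs are below) =====
def Claim_equal_getXI : Prop := ∀ (ipids : List Int), Dom_getXI ipids → Spec_getXI ipids (getXI ipids)

-- ===== LEMMAS AND PROOFS =====
lemma aZero_eq (l : List Int) : aZero l = l.all (fun x => x == 0) := by
  induction l with
  | nil => rfl
  | cons x t ih => by_cases h : x = 0 <;> simp [aZero, h, ih]

lemma diffsA_eq (l : List Int) :
    diffsA l = List.zipWith (fun a b => if b > a then b - a else b - a + 0x10000) l l.tail := by
  induction l with
  | nil => rfl
  | cons a t ih =>
    cases t with
    | nil => rfl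
    | cons b rest =>
      simp only [diffsA, ih, List.tail_cons, List.zipWith]
      split <;> ring_nf

lemma aEq2w_eq (l : List Int) : aEq2w l = l.all (fun d => !decide (d < 20000)) := by
  induction l with
  | nil => rfl
  | cons d t ih => by_cases h : d < 20000 <;> simp [aEq2w, h, ih]

lemma aAllEq_eq (l : List Int) : aAllEq l = l.all (fun d => d == 0) := by
  induction l with
  | nil => rfl
  | cons d t ih => by_cases h : d = 0 <;> simp [aAllEq, h, ih]

lemma aRI_eq (l : List Int) :
    aRI l = l.any (fun d => (decide (d > 1000) && !(PySem.Int.mod d 256 == 0)) ||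
                            ((PySem.Int.mod d 256 == 0) && decide (d ≥ 25600))) := by
  induction l with
  | nil => rfl
  | cons d t ih =>
    rw [aRI, List.any_cons, ← ih]
    split
    · rename_i h; rw [h]; rfl
    · rename_i h; rw [Bool.not_eq_true] at h; rw [h]; rfl

lemma aBI_eq (l : List Int) :
    aBI l = l.all (fun d => !((!(PySem.Int.mod d 256 == 0)) || decide (d > 5120))) := by
  induction l with
  | nil => rfl
  | cons d t ih =>
    rw [aBI, List.all_cons, ← ih]
    split
    · rename_i h; rw [h]; rfl
    · rename_i h; rw [Bool.not_eq_true] at h; rw [h]; rfl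

lemma aI_eq (l : List Int) : aI l = l.all (fun d => !decide (d > 9)) := by
  induction l with
  | nil => rfl
  | cons d t ih => by_cases h : d > 9 <;> simp [aI, h, ih]

lemma fold_flags (l : List Int) (b1 b2 b3 b4 b5 : Bool) :
    l.foldl bStep (b1, b2, b3, b4, b5) =
      (b1 && l.all (fun d => !decide (d < 20000)),
       b2 && l.all (fun d => d == 0),
       b3 || l.any (fun d => (decide (d > 1000) && !(PySem.Int.mod d 256 == 0)) ||
                             ((PySem.Int.mod d 256 == 0) && decide (d ≥ 25600))),
       b4 && l.all (fun d => !((!(PySem.Int.mod d 256 == 0)) || decide (d > 5120))),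
       b5 && l.all (fun d => !decide (d > 9))) := by
  induction l generalizing b1 b2 b3 b4 b5 with
  | nil => simp
  | cons d t ih =>
    simp only [List.foldl_cons, bStep, List.all_cons, List.any_cons, ih,
      Bool.and_assoc, Bool.or_assoc]

-- ===== VERDICT (by name: the statement is the Claim_ definition above) =====
theorem getXI_spec : Claim_equal_getXI := by
  intro ipids _
  show getXI ipids = getXI_alt ipids
  simp only [getXI, getXI_alt, aZero_eq, diffsA_eq, fold_flags,
    aEq2w_eq, aAllEq_eq, aRI_eq, aBI_eq, aI_eq, Bool.true_and, Bool.false_or]
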